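-- pv_equiv track=rewrite | github.com/AnastasiaEnckell/Gross-NeveuModel | bk-indices.py | writetheindices
-- ===== SOURCE A (Python) =====
-- n = 4 #number of qubits is 2^n
--
-- def writetheindices(n): # function writes the indices of the exitation operators for 2^n qubits
-- 	ind1plus = [[ 0,  6], [ 1 , 7]] # array for the H_1 with plus sign
-- 	ind1minus = [[ 2  ,4],[ 3 , 5]] # array for the H_1 with minus sign
-- 	ind2minus = [[ 0 , 4],[ 1 , 5]] # array for the H_1 with plus sign
-- 	ind2plus = [[ 2 , 6],[ 3 , 7]] # array for the H_1 with minus sign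
-- 	for i in range(0, int((2**n)/2)-2):
-- 		help1 = (ind1plus[i][0]+4) % (2**n)
-- 		help2 = (ind1plus[i][1]+4) % (2**n)
-- 		if help1<help2:
-- 			ind1plus.append([help1, help2])
-- 			ind2plus.append([(ind2plus[i][0]+4) % (2**n), (ind2plus[i][1]+4) % (2**n)])
-- 			ind1minus.append([(ind1minus[i][0]+4) % (2**n), (ind1minus[i][1]+4) % (2**n)])
-- 			ind2minus.append([(ind2minus[i][0]+4) % (2**n), (ind2minus[i][1]+4) % (2**n)])
-- 		else:
-- 			ind1plus.append([help2, help1])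
-- 			ind2plus.append([(ind2plus[i][1]+4) % (2**n), (ind2plus[i][0]+4) % (2**n)])
-- 			ind1minus.append([(ind1minus[i][1]+4) % (2**n), (ind1minus[i][0]+4) % (2**n)])
-- 			ind2minus.append([(ind2minus[i][1]+4) % (2**n), (ind2minus[i][0]+4) % (2**n)])
-- 	return ind1plus, ind1minus, ind2plus, ind2minus
-- ===== SOURCE B (Python) =====
-- def writetheindices(n):  # two-pass rebuild: flag table from the ind1plus recurrence, then each list from its own seeds
--     m = 2 ** n if n >= 1 else 1
--     steps = 2 ** (n - 1) - 2 if n >= 1 else 0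
--     # pass 1: compute the swap flags from the ind1plus recurrence alone,
--     # keeping only a sliding window of the last two pairs
--     flags = []
--     u, v = [0, 6], [1, 7]
--     for _ in range(steps):
--         x, y = (u[0] + 4) % m, (u[1] + 4) % m
--         if x < y:
--             flags.append(True)
--             u, v = v, [x, y]
--         else:
--             flags.append(False)
--             u, v = v, [y, x]
--     # pass 2: rebuild each list from its own two seed pairs, ordering every
--     # new pair by the shared flag, again with a sliding two-pair window
--     def build(s0, s1):
--         out = [s0, s1]
--         u, v = s0, s1
--         for f in flags:
--             x, y = (u[0] + 4) % m, (u[1] + 4) % m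
--             w = [x, y] if f else [y, x]
--             out.append(w)
--             u, v = v, w
--         return out
--     return (build([0, 6], [1, 7]), build([2, 4], [3, 5]),
--             build([2, 6], [3, 7]), build([0, 4], [1, 5]))
-- ===== Notes on version B (the rewrite author's own statement) =====
-- stated objective: alternative
-- what changed: Replaces A's single combined loop that grows and indexes all four lists with two separate passes: a first pass computes a boolean swap-flag table from the ind1plus recurrence alone using a sliding two-pair window, and a second pass rebuilds each of the four lists independently from its own seeds driven by the shared flag table, never indexing into the growing lists; Pre_ excludes n >= 1025 where A raises OverflowError converting 2**n to float.
import Mathlib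
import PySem

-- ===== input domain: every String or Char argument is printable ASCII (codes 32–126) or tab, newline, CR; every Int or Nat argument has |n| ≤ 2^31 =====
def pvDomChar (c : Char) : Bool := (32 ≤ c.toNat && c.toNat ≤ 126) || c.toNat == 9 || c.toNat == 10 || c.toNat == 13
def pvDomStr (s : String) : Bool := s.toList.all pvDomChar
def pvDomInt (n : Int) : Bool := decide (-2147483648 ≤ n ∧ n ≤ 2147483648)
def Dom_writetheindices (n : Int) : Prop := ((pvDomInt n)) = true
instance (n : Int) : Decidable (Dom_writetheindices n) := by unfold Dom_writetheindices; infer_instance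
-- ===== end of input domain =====

-- B replaces A's combined grow-and-index loop by two passes: a swap-flag table from the
-- ind1plus recurrence, then an independent rebuild of each of the four lists from the shared flags.

-- ===== PORT A =====
-- number of loop iterations: exact value of `int((2**n)/2) - 2` as clamped by `range`
-- (for 1 ≤ n ≤ 1024 the float division of 2^n by 2 is exact; for n ≤ 0 it gives 0 or -2, an empty range)
def pvStepsA (n : Int) : Nat := if 1 ≤ n then 2 ^ (n - 1).toNat - 2 else 0

-- one iteration of A's loop; the list indexings `[i]` are always in range (the lists have
-- length i+2 when index i is read), so `getD` with a dummy default is exact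
def pvStepA (m : Int) (s : List (List Int) × List (List Int) × List (List Int) × List (List Int))
    (i : Nat) : List (List Int) × List (List Int) × List (List Int) × List (List Int) :=
  let p := s.1.getD i []
  let help1 := PySem.Int.mod (p.getD 0 0 + 4) m
  let help2 := PySem.Int.mod (p.getD 1 0 + 4) m
  let q1m := s.2.1.getD i []
  let q2p := s.2.2.1.getD i []
  let q2m := s.2.2.2.getD i []
  if help1 < help2 then
    (s.1 ++ [[help1, help2]],
     s.2.1 ++ [[PySem.Int.mod (q1m.getD 0 0 + 4) m, PySem.Int.mod (q1m.getD 1 0 + 4) m]],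
     s.2.2.1 ++ [[PySem.Int.mod (q2p.getD 0 0 + 4) m, PySem.Int.mod (q2p.getD 1 0 + 4) m]],
     s.2.2.2 ++ [[PySem.Int.mod (q2m.getD 0 0 + 4) m, PySem.Int.mod (q2m.getD 1 0 + 4) m]])
  else
    (s.1 ++ [[help2, help1]],
     s.2.1 ++ [[PySem.Int.mod (q1m.getD 1 0 + 4) m, PySem.Int.mod (q1m.getD 0 0 + 4) m]],
     s.2.2.1 ++ [[PySem.Int.mod (q2p.getD 1 0 + 4) m, PySem.Int.mod (q2p.getD 0 0 + 4) m]],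
     s.2.2.2 ++ [[PySem.Int.mod (q2m.getD 1 0 + 4) m, PySem.Int.mod (q2m.getD 0 0 + 4) m]])

def writetheindices (n : Int) : List (List Int) × List (List Int) × List (List Int) × List (List Int) :=
  let m : Int := 2 ^ n.toNat  -- `2**n`; only used as modulus when the loop runs, i.e. n ≥ 3
  (List.range (pvStepsA n)).foldl (pvStepA m)
    ([[0, 6], [1, 7]], [[2, 4], [3, 5]], [[2, 6], [3, 7]], [[0, 4], [1, 5]])

-- ===== PORT B =====
def pvStepsB (n : Int) : Nat := if 1 ≤ n then 2 ^ (n - 1).toNat - 2 else 0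

-- pass 1 of B: the swap-flag table from the ind1plus recurrence, sliding window (u, v)
def pvFlags (m : Int) : Nat → List Int → List Int → List Bool
  | 0, _, _ => []
  | k + 1, u, v =>
    let x := PySem.Int.mod (u.getD 0 0 + 4) m
    let y := PySem.Int.mod (u.getD 1 0 + 4) m
    if x < y then true :: pvFlags m k v [x, y]
    else false :: pvFlags m k v [y, x]

-- pass 2 of B: the elements appended after the two seeds, driven by the flag list
def pvBuildGo (m : Int) : List Bool → List Int → List Int → List (List Int)
  | [], _, _ => []
  | f :: fs, u, v =>
    let x := PySem.Int.mod (u.getD 0 0 + 4) m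
    let y := PySem.Int.mod (u.getD 1 0 + 4) m
    let w := if f then [x, y] else [y, x]
    w :: pvBuildGo m fs v w

def pvBuild (m : Int) (fs : List Bool) (s0 s1 : List Int) : List (List Int) :=
  s0 :: s1 :: pvBuildGo m fs s0 s1

def writetheindices_alt (n : Int) : List (List Int) × List (List Int) × List (List Int) × List (List Int) :=
  let m : Int := if 1 ≤ n then 2 ^ n.toNat else 1
  let fs := pvFlags m (pvStepsB n) [0, 6] [1, 7]
  (pvBuild m fs [0, 6] [1, 7], pvBuild m fs [2, 4] [3, 5],
   pvBuild m fs [2, 6] [3, 7], pvBuild m fs [0, 4] [1, 5])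

-- ===== PRECONDITION & SPEC =====
-- Pre_ excludes exactly n ≥ 1025, where Python A raises OverflowError (int((2**n)/2)
-- cannot convert 2**n to float); A returns normally on every other Int.
def Pre_writetheindices (n : Int) : Prop := n ≤ 1024
instance (n : Int) : Decidable (Pre_writetheindices n) := by unfold Pre_writetheindices; infer_instance
def pvWitness_writetheindices : Int := 3

def Spec_writetheindices (n : Int) (out : List (List Int) × List (List Int) × List (List Int) × List (List Int)) : Prop := out = writetheindices_alt n
instance (n : Int) (out : List (List Int) × List (List Int) × List (List Int) × List (List Int)) : Decidable (Spec_writetheindices n out) := by unfold Spec_writetheindices; infer_instance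

-- ===== CLAIM (what is proved, stated in full; the proofs are below) =====
def Claim_equal_writetheindices : Prop := ∀ (n : Int), Dom_writetheindices n → Pre_writetheindices n → Spec_writetheindices n (writetheindices n)

-- ===== LEMMAS AND PROOFS =====

-- window of the flag pass after k steps
def pvFwin (m : Int) : Nat → List Int → List Int → List Int
  | 0, u, _ => u
  | k + 1, u, v =>
    let x := PySem.Int.mod (u.getD 0 0 + 4) m
    let y := PySem.Int.mod (u.getD 1 0 + 4) m
    pvFwin m k v (if x < y then [x, y] else [y, x])

-- the element built from window w under flag f
def pvMk (m : Int) (f : Bool) (w : List Int) : List Int :=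
  let x := PySem.Int.mod (w.getD 0 0 + 4) m
  let y := PySem.Int.mod (w.getD 1 0 + 4) m
  if f then [x, y] else [y, x]

-- window of a build pass after consuming fs
def pvBwin (m : Int) : List Bool → List Int → List Int → List Int
  | [], u, _ => u
  | f :: fs, u, v => pvBwin m fs v (pvMk m f u)

def pvFlagAt (m : Int) (k : Nat) (u v : List Int) : Bool :=
  let w := pvFwin m k u v
  decide (PySem.Int.mod (w.getD 0 0 + 4) m < PySem.Int.mod (w.getD 1 0 + 4) m)

theorem pvFlags_length (m : Int) (k : Nat) : ∀ u v, (pvFlags m k u v).length = k := by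
  induction k with
  | zero => intro u v; rfl
  | succ k ih =>
    intro u v
    simp only [pvFlags]
    split <;> simp [ih]

theorem pvFlags_snoc (m : Int) (k : Nat) : ∀ u v,
    pvFlags m (k + 1) u v = pvFlags m k u v ++ [pvFlagAt m k u v] := by
  induction k with
  | zero =>
    intro u v
    simp only [pvFlags, pvFlagAt, pvFwin]
    split <;> simp_all
  | succ k ih =>
    intro u v
    conv_lhs => rw [pvFlags]
    conv_rhs => rw [pvFlags]
    simp only [pvFlagAt, pvFwin]
    split <;> simp [ih, pvFlagAt]

theorem pvBuildGo_snoc (m : Int) (fs : List Bool) (f : Bool) : ∀ u v,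
    pvBuildGo m (fs ++ [f]) u v = pvBuildGo m fs u v ++ [pvMk m f (pvBwin m fs u v)] := by
  induction fs with
  | nil => intro u v; simp [pvBuildGo, pvBwin, pvMk]
  | cons g gs ih =>
    intro u v
    simp only [List.cons_append, pvBuildGo, pvBwin, ih, pvMk]

theorem pvBuild_getD (m : Int) (fs : List Bool) (d : List Int) : ∀ s0 s1,
    (pvBuild m fs s0 s1).getD fs.length d = pvBwin m fs s0 s1 := by
  induction fs with
  | nil => intro s0 s1; rfl
  | cons f fs ih =>
    intro s0 s1
    simp only [pvBuild, pvBuildGo, pvBwin, List.length_cons]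
    have h := ih s1 (pvMk m f s0)
    simp only [pvBuild] at h
    simpa [pvMk, List.getD] using h

theorem pvBwin_flags_self (m : Int) (k : Nat) : ∀ u v,
    pvBwin m (pvFlags m k u v) u v = pvFwin m k u v := by
  induction k with
  | zero => intro u v; rfl
  | succ k ih =>
    intro u v
    simp only [pvFlags, pvFwin]
    split <;> simp_all [pvBwin, pvMk]

theorem pvFoldA (m : Int) (k : Nat) :
    (List.range k).foldl (pvStepA m)
      ([[0, 6], [1, 7]], [[2, 4], [3, 5]], [[2, 6], [3, 7]], [[0, 4], [1, 5]]) =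
    (pvBuild m (pvFlags m k [0, 6] [1, 7]) [0, 6] [1, 7],
     pvBuild m (pvFlags m k [0, 6] [1, 7]) [2, 4] [3, 5],
     pvBuild m (pvFlags m k [0, 6] [1, 7]) [2, 6] [3, 7],
     pvBuild m (pvFlags m k [0, 6] [1, 7]) [0, 4] [1, 5]) := by
  induction k with
  | zero => rfl
  | succ k ih =>
    rw [List.range_succ, List.foldl_append, ih]
    rw [pvFlags_snoc]
    have hlen : (pvFlags m k [0, 6] [1, 7]).length = k := pvFlags_length m k _ _
    set F := pvFlags m k [0, 6] [1, 7] with hF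
    have hw1 := pvBuild_getD m F ([] : List Int) [0, 6] [1, 7]
    have hw2 := pvBuild_getD m F ([] : List Int) [2, 4] [3, 5]
    have hw3 := pvBuild_getD m F ([] : List Int) [2, 6] [3, 7]
    have hw4 := pvBuild_getD m F ([] : List Int) [0, 4] [1, 5]
    rw [hlen] at hw1 hw2 hw3 hw4
    have hwin : pvBwin m F [0, 6] [1, 7] = pvFwin m k [0, 6] [1, 7] :=
      pvBwin_flags_self m k _ _
    simp only [List.foldl_cons, List.foldl_nil, pvStepA, hw1, hw2, hw3, hw4, hwin]
    simp only [pvBuild, pvBuildGo_snoc, pvFlagAt, pvMk]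
    split
    · rename_i h
      simp_all
    · rename_i h
      simp_all

-- ===== VERDICT (by name: the statement is the Claim_ definition above) =====
theorem writetheindices_spec : Claim_equal_writetheindices := by
  intro n _ hpre
  unfold Spec_writetheindices writetheindices writetheindices_alt pvStepsA pvStepsB
  by_cases h1 : (1 : Int) ≤ n
  · simp only [if_pos h1]
    exact pvFoldA (2 ^ n.toNat) _
  · simp only [if_neg h1]
    rfl
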